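-- pv_equiv track=rewrite | github.com/mohammadmasoumi/interview_preparation | strings/reversal_gfg.py | special_array_reversal
-- ===== SOURCE A (Python) =====
-- import string
--
-- def is_special(char):
--     if char in string.punctuation:
--         return True
--
--     return False
--
-- def special_array_reversal(my_string):
--     i, j = 0, len(my_string) - 1
--
--     reversed_string = [''] * len(my_string)
--
--     while (i <= j):
--         char_i, char_j = my_string[i], my_string[j]
--
--         if is_special(char_i):
--             reversed_string[i] = char_i
--             i += 1
--             continue
--
--         if is_special(char_j):
--             reversed_string[j] = char_j
--             j -= 1
--             continue
--
--         reversed_string[i], reversed_string[j] = char_j, char_i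
--         j -= 1
--         i += 1
--
--     return ''.join(reversed_string)
-- ===== SOURCE B (Python) =====
-- import string
--
-- def special_array_reversal(my_string):
--     letters = [c for c in my_string if c not in string.punctuation]
--     out = []
--     k = len(letters) - 1
--     for c in my_string:
--         if c in string.punctuation:
--             out.append(c)
--         else:
--             out.append(letters[k])
--             k -= 1
--     return ''.join(out)
-- ===== Notes on version B (the rewrite author's own statement) =====
-- stated objective: simpler
-- what changed: Replaces A's in-place two-pointer swap over a preallocated buffer with a two-pass decomposition: filter out the non-punctuation characters once, then emit the string left-to-right taking punctuation unchanged and the filtered characters from the end via a descending index.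
import Mathlib
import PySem

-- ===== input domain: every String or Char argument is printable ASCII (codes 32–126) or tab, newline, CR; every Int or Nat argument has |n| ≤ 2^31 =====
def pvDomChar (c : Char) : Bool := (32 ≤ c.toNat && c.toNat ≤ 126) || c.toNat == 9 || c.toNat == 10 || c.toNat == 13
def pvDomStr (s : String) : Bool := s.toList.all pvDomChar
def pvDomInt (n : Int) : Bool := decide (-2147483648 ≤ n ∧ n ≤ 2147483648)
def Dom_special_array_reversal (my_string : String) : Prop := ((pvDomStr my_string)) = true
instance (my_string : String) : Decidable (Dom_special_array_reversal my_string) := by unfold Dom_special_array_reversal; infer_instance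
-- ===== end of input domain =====

-- B replaces A's in-place two-pointer swap loop with a two-pass "filter out the punctuation,
-- then emit the filtered characters back-to-front" decomposition (objective: simpler).

-- string.punctuation, shared by both ports (same membership test as Python's `in string.punctuation`)
def pvPunct : List Char := "!\"#$%&'()*+,-./:;<=>?@[\\]^_`{|}~".toList
def isSpecialPV (c : Char) : Bool := pvPunct.contains c

-- ===== PORT A =====
-- the while (i <= j) loop of A; buf is reversed_string, s[i] via pyGet? (always in range while i <= j)
def loopA (s : List Char) (buf : List Char) (i j : Int) : List Char :=
  if _h : i ≤ j then
    let ci := (PySem.List.pyGet? s i).getD ' '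
    let cj := (PySem.List.pyGet? s j).getD ' '
    if isSpecialPV ci then loopA s (buf.set i.toNat ci) (i + 1) j
    else if isSpecialPV cj then loopA s (buf.set j.toNat cj) i (j - 1)
    else loopA s ((buf.set i.toNat cj).set j.toNat ci) (i + 1) (j - 1)
  else buf
termination_by (j + 1 - i).toNat
decreasing_by all_goals omega

def special_array_reversal (my_string : String) : String :=
  let l := my_string.toList
  String.ofList (loopA l (List.replicate l.length ' ') 0 ((l.length : Int) - 1))

-- ===== PORT B =====
-- second pass of Source B: punctuation unchanged, else letters[k] with k descending
def emitB (letters : List Char) : List Char → Int → List Char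
  | [], _ => []
  | c :: rest, k =>
    if isSpecialPV c then c :: emitB letters rest k
    else (PySem.List.pyGet? letters k).getD ' ' :: emitB letters rest (k - 1)

def special_array_reversal_alt (my_string : String) : String :=
  let l := my_string.toList
  let letters := l.filter (fun c => !isSpecialPV c)
  String.ofList (emitB letters l ((letters.length : Int) - 1))

-- ===== PRECONDITION & SPEC =====
def Spec_special_array_reversal (my_string : String) (out : String) : Prop := out = special_array_reversal_alt my_string
instance (my_string : String) (out : String) : Decidable (Spec_special_array_reversal my_string out) := by unfold Spec_special_array_reversal; infer_instance

-- ===== CLAIM (what is proved, stated in full; the proofs are below) =====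
def Claim_equal_special_array_reversal : Prop := ∀ (my_string : String), Dom_special_array_reversal my_string → Spec_special_array_reversal my_string (special_array_reversal my_string)

-- ===== LEMMAS AND PROOFS =====

-- common specification: fill the non-punctuation positions of l from r, front to back
def fillPV : List Char → List Char → List Char
  | [], _ => []
  | c :: rest, r =>
    if isSpecialPV c then c :: fillPV rest r
    else r.headD ' ' :: fillPV rest r.tail

def cntPV (l : List Char) : Nat := l.countP (fun c => !isSpecialPV c)

def spec2 (l : List Char) : List Char := fillPV l ((l.filter (fun c => !isSpecialPV c)).reverse)

theorem cnt_cons_special {a : Char} (h : isSpecialPV a = true) (xs : List Char) :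
    cntPV (a :: xs) = cntPV xs := by simp [cntPV, h]

theorem cnt_cons_nonspecial {a : Char} (h : isSpecialPV a = false) (xs : List Char) :
    cntPV (a :: xs) = cntPV xs + 1 := by simp [cntPV, h]

theorem cnt_eq_filter_length (l : List Char) :
    (l.filter (fun c => !isSpecialPV c)).length = cntPV l := List.countP_eq_length_filter.symm

theorem fill_append : ∀ (xs ys r : List Char), cntPV xs ≤ r.length →
    fillPV (xs ++ ys) r = fillPV xs (r.take (cntPV xs)) ++ fillPV ys (r.drop (cntPV xs))
  | [], ys, r, _ => by simp [fillPV, cntPV]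
  | c :: xs, ys, r, h => by
    by_cases hc : isSpecialPV c
    · rw [cnt_cons_special hc] at h ⊢
      simp only [List.cons_append, fillPV, hc, if_true]
      rw [fill_append xs ys r h]
    · rw [cnt_cons_nonspecial (Bool.of_not_eq_true hc ▸ rfl : isSpecialPV c = false)] at h ⊢
      match r with
      | [] => exact absurd h (by simp)
      | x :: r' =>
        simp only [List.cons_append, fillPV, hc, List.take_succ_cons, Bool.false_eq_true,
          List.drop_succ_cons, List.headD_cons, List.tail_cons, if_false]
        rw [fill_append xs ys r' (by simpa using h)]

theorem spec2_nil : spec2 [] = [] := rfl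

theorem spec2_cons_special {a : Char} (h : isSpecialPV a = true) (xs : List Char) :
    spec2 (a :: xs) = a :: spec2 xs := by
  simp [spec2, h, fillPV]

theorem spec2_append_special {b : Char} (h : isSpecialPV b = true) (xs : List Char) :
    spec2 (xs ++ [b]) = spec2 xs ++ [b] := by
  have hf : (xs ++ [b]).filter (fun c => !isSpecialPV c) = xs.filter (fun c => !isSpecialPV c) := by
    simp [List.filter_append, h]
  have hlen : ((xs.filter (fun c => !isSpecialPV c)).reverse).length = cntPV xs := by
    simp [cnt_eq_filter_length]
  simp only [spec2, hf]
  rw [fill_append xs [b] _ (le_of_eq hlen.symm)]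
  rw [List.take_of_length_le (le_of_eq hlen), List.drop_of_length_le (le_of_eq hlen)]
  simp [fillPV, h]

theorem spec2_single {a : Char} (h : isSpecialPV a = false) : spec2 [a] = [a] := by
  simp [spec2, h, fillPV]

theorem spec2_both {a b : Char} (ha : isSpecialPV a = false) (hb : isSpecialPV b = false)
    (xs : List Char) : spec2 (a :: (xs ++ [b])) = b :: spec2 xs ++ [a] := by
  have hf : (a :: (xs ++ [b])).filter (fun c => !isSpecialPV c)
      = a :: (xs.filter (fun c => !isSpecialPV c) ++ [b]) := by
    simp [List.filter_append, ha, hb]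
  have hlen : (xs.filter (fun c => !isSpecialPV c)).reverse.length = cntPV xs := by
    simp [cnt_eq_filter_length]
  simp only [spec2, hf, List.reverse_append, List.reverse_cons, List.reverse_nil,
    List.nil_append, List.cons_append]
  rw [show fillPV (a :: (xs ++ [b])) (b :: ((xs.filter (fun c => !isSpecialPV c)).reverse ++ [a]))
      = b :: fillPV (xs ++ [b]) ((xs.filter (fun c => !isSpecialPV c)).reverse ++ [a]) by
    simp [fillPV, ha]]
  rw [fill_append xs [b] _ (by simp [hlen])]
  rw [show cntPV xs = ((xs.filter (fun c => !isSpecialPV c)).reverse).length from hlen.symm]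
  rw [List.take_left, List.drop_left]
  simp [fillPV, hb]

theorem take_set_succ {l : List Char} {i : Nat} {a : Char} (h : i < l.length) :
    (l.set i a).take (i + 1) = l.take i ++ [a] := by
  rw [List.set_eq_take_append_cons_drop, if_pos h, List.take_append]
  simp [Nat.min_eq_left h.le]

theorem drop_set_self {l : List Char} {i : Nat} {a : Char} (h : i < l.length) :
    (l.set i a).drop i = a :: l.drop (i + 1) := by
  rw [List.set_eq_take_append_cons_drop, if_pos h, List.drop_append]
  simp [Nat.min_eq_left h.le]

theorem seg_head {s : List Char} {i jp : Nat} (h1 : i < jp) (h2 : jp ≤ s.length) :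
    (s.drop i).take (jp - i) = s[i]'(lt_of_lt_of_le h1 h2) :: (s.drop (i+1)).take (jp - (i+1)) := by
  rw [List.drop_eq_getElem_cons (lt_of_lt_of_le h1 h2)]
  rw [show jp - i = (jp - (i+1)) + 1 by omega, List.take_succ_cons]

theorem seg_last {s : List Char} {i jp : Nat} (h1 : i < jp) (h2 : jp ≤ s.length) :
    (s.drop i).take (jp - i)
      = (s.drop i).take (jp - 1 - i) ++ [s[jp-1]'(by omega)] := by
  rw [show jp - i = (jp - 1 - i) + 1 by omega, List.take_add_one]
  congr 1
  rw [List.getElem?_drop, show i + (jp - 1 - i) = jp - 1 by omega,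
    List.getElem?_eq_getElem (by omega)]
  rfl

theorem loopA_eq : ∀ (n : Nat) (s buf : List Char) (i jp : Nat), jp - i ≤ n → i ≤ jp →
    jp ≤ s.length → buf.length = s.length →
    loopA s buf (i : Int) ((jp : Int) - 1)
      = buf.take i ++ spec2 ((s.drop i).take (jp - i)) ++ buf.drop jp := by
  intro n
  induction n with
  | zero =>
    intro s buf i jp hn hij hjs hbuf
    have hij' : i = jp := by omega
    rw [loopA, dif_neg (by omega)]
    subst hij'
    simp [spec2_nil, List.take_append_drop]
  | succ n ih =>
    intro s buf i jp hn hij hjs hbuf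
    by_cases heq : i = jp
    · rw [loopA, dif_neg (by omega)]
      subst heq
      simp [spec2_nil, List.take_append_drop]
    · have hlt : i < jp := by omega
      have hi : i < s.length := lt_of_lt_of_le hlt hjs
      have hj : jp - 1 < s.length := by omega
      have hgi : PySem.List.pyGet? s (i : Int) = some s[i] := by
        simp [PySem.List.pyGet?_natCast, List.getElem?_eq_getElem hi]
      have hgj : PySem.List.pyGet? s ((jp : Int) - 1) = some s[jp-1] := by
        rw [show (jp : Int) - 1 = ((jp - 1 : Nat) : Int) by omega]
        simp [PySem.List.pyGet?_natCast, List.getElem?_eq_getElem hj]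
      rw [loopA, dif_pos (by omega : (i : Int) ≤ (jp : Int) - 1)]
      simp only [hgi, hgj, Option.getD_some]
      by_cases hci : isSpecialPV s[i]
      · rw [if_pos hci]
        rw [show (i : Int) + 1 = ((i + 1 : Nat) : Int) by omega,
          show ((i : Int)).toNat = i by omega]
        rw [ih s (buf.set i s[i]) (i+1) jp (by omega) (by omega) hjs (by simp [hbuf])]
        rw [take_set_succ (hbuf ▸ hi), List.drop_set_of_lt hlt]
        rw [seg_head hlt hjs, spec2_cons_special hci]
        simp [List.append_assoc]
      · rw [if_neg hci]
        have hci' : isSpecialPV s[i] = false := by simpa using hci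
        by_cases hcj : isSpecialPV s[jp-1]
        · rw [if_pos hcj]
          rw [show (jp : Int) - 1 - 1 = ((jp - 1 : Nat) : Int) - 1 by omega,
            show ((jp : Int) - 1).toNat = jp - 1 by omega]
          rw [ih s (buf.set (jp-1) s[jp-1]) i (jp-1) (by omega) (by omega) (by omega)
            (by simp [hbuf])]
          rw [List.take_set_of_le (by omega), drop_set_self (by omega),
            show jp - 1 + 1 = jp by omega]
          rw [seg_last hlt hjs, spec2_append_special hcj]
          simp [List.append_assoc]
        · rw [if_neg hcj]
          have hcj' : isSpecialPV s[jp-1] = false := by simpa using hcj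
          rw [show ((i : Int)).toNat = i by omega,
            show ((jp : Int) - 1).toNat = jp - 1 by omega]
          by_cases hone : jp = i + 1
          · subst hone
            rw [loopA, dif_neg (by omega)]
            simp only [show i + 1 - 1 = i from rfl]
            rw [List.set_set]
            rw [show i + 1 - i = 1 by omega]
            rw [List.drop_eq_getElem_cons hi, List.take_succ_cons, List.take_zero]
            rw [spec2_single hci']
            rw [List.set_eq_take_append_cons_drop, if_pos (hbuf ▸ hi)]
            simp
          · have h2 : i + 1 ≤ jp - 1 := by omega
            rw [show (i : Int) + 1 = ((i + 1 : Nat) : Int) by omega,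
              show (jp : Int) - 1 - 1 = ((jp - 1 : Nat) : Int) - 1 by omega]
            rw [ih s ((buf.set i s[jp-1]).set (jp-1) s[i]) (i+1) (jp-1) (by omega) h2
              (by omega) (by simp [hbuf])]
            rw [List.take_set_of_le h2, take_set_succ (hbuf ▸ hi),
              drop_set_self (by simp; omega), show jp - 1 + 1 = jp by omega,
              List.drop_set_of_lt hlt]
            rw [seg_head hlt hjs, seg_last (by omega : i + 1 < jp) hjs]
            rw [show jp - 1 - (i+1) = jp - (i+1) - 1 by omega] at *
            rw [spec2_both hci' hcj' _]
            simp [List.append_assoc]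

theorem emitB_gen : ∀ (l : List Char) (letters : List Char) (m : Nat), cntPV l = m →
    m ≤ letters.length → emitB letters l ((m : Int) - 1) = fillPV l ((letters.take m).reverse)
  | [], letters, m, _, _ => by simp [emitB, fillPV]
  | c :: rest, letters, m, hc, hm => by
    by_cases hs : isSpecialPV c
    · rw [cnt_cons_special hs] at hc
      simp only [emitB, fillPV, hs, if_true]
      rw [emitB_gen rest letters m hc hm]
    · have hs' : isSpecialPV c = false := by simpa using hs
      rw [cnt_cons_nonspecial hs'] at hc
      have hm1 : m - 1 < letters.length := by omega
      have hget : PySem.List.pyGet? letters ((m : Int) - 1) = some letters[m-1] := by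
        rw [show (m : Int) - 1 = ((m - 1 : Nat) : Int) by omega]
        simp [PySem.List.pyGet?_natCast, List.getElem?_eq_getElem hm1]
      have htake : letters.take m = letters.take (m - 1) ++ [letters[m-1]] := by
        conv_lhs => rw [show m = (m - 1) + 1 by omega]
        rw [List.take_add_one, List.getElem?_eq_getElem (by omega)]
        simp
      simp only [emitB, fillPV, hs', Bool.false_eq_true, if_false, hget, Option.getD_some]
      rw [htake]
      simp only [List.reverse_append, List.reverse_singleton, List.singleton_append,
        List.headD_cons, List.tail_cons]
      rw [show (m : Int) - 1 - 1 = ((m - 1 : Nat) : Int) - 1 by omega]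
      rw [emitB_gen rest letters (m - 1) (by omega) (by omega)]

theorem A_eq_spec2 (s : List Char) :
    loopA s (List.replicate s.length ' ') 0 ((s.length : Int) - 1) = spec2 s := by
  have h := loopA_eq s.length s (List.replicate s.length ' ') 0 s.length (by omega) (by omega)
    le_rfl (by simp)
  simpa using h

theorem B_eq_spec2 (s : List Char) :
    emitB (s.filter (fun c => !isSpecialPV c)) s
      (((s.filter (fun c => !isSpecialPV c)).length : Int) - 1) = spec2 s := by
  rw [emitB_gen s _ (s.filter (fun c => !isSpecialPV c)).length
    (cnt_eq_filter_length s).symm le_rfl]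
  simp [spec2]

-- ===== VERDICT (by name: the statement is the Claim_ definition above) =====
theorem special_array_reversal_spec : Claim_equal_special_array_reversal := by
  intro s _
  unfold Spec_special_array_reversal special_array_reversal special_array_reversal_alt
  simp only [A_eq_spec2, B_eq_spec2]
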